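-- pv_equiv track=rewrite | github.com/XyzHuy/-DL-Fine-tuning-coding-model | data/solution/Solution2513.py | minimizeSet
-- ===== SOURCE A (Python) =====
-- import math
-- import math
--
-- def minimizeSet(divisor1: int, divisor2: int, uniqueCnt1: int, uniqueCnt2: int) -> int:
--     def can_form_sets(mid):
--         lcm = (divisor1 * divisor2) // math.gcd(divisor1, divisor2)
--         not_div_by_divisor1 = mid - mid // divisor1
--         not_div_by_divisor2 = mid - mid // divisor2
--         not_div_by_both = mid - mid // lcm
--
--         # Check if we can form the sets
--         return (not_div_by_divisor1 >= uniqueCnt1 and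
--                 not_div_by_divisor2 >= uniqueCnt2 and
--                 not_div_by_both >= uniqueCnt1 + uniqueCnt2)
--
--     left, right = 1, 10**10
--     while left < right:
--         mid = (left + right) // 2
--         if can_form_sets(mid):
--             right = mid
--         else:
--             left = mid + 1
--
--     return left
-- ===== SOURCE B (Python) =====
-- import math
--
--
-- def minimizeSet(divisor1: int, divisor2: int, uniqueCnt1: int, uniqueCnt2: int) -> int:
--     def first_reaching(d, c):
--         # smallest n >= 1 with at least c positive non-multiples of d in 1..n,
--         # i.e. n - n // d >= c
--         if c <= 0:
--             return 1
--         groups, rest = divmod(c - 1, d - 1)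
--         return groups * d + rest + 1
--
--     lcm = divisor1 * divisor2 // math.gcd(divisor1, divisor2)
--     return max(first_reaching(divisor1, uniqueCnt1),
--                first_reaching(divisor2, uniqueCnt2),
--                first_reaching(lcm, uniqueCnt1 + uniqueCnt2))
-- ===== Notes on version B (the rewrite author's own statement) =====
-- stated objective: faster
-- what changed: Replaces the ~34-iteration binary search with a closed-form O(1) computation (the c-th positive non-multiple of d via one divmod, maximised over the two divisors and their lcm); Pre_ excludes divisor 0, where A raises ZeroDivisionError, and the infeasible instances (a divisor or the lcm equal to 1 with a positive required count), where no threshold exists and A merely returns its search bound 10**10.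
-- outside the precondition, e.g. on minimizeSet(1, 3, 2, 1): A returns 10000000000, B raises ZeroDivisionError; on minimizeSet(-1, -1, 1, 0): A returns 10000000000, B raises ZeroDivisionError
import Mathlib
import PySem

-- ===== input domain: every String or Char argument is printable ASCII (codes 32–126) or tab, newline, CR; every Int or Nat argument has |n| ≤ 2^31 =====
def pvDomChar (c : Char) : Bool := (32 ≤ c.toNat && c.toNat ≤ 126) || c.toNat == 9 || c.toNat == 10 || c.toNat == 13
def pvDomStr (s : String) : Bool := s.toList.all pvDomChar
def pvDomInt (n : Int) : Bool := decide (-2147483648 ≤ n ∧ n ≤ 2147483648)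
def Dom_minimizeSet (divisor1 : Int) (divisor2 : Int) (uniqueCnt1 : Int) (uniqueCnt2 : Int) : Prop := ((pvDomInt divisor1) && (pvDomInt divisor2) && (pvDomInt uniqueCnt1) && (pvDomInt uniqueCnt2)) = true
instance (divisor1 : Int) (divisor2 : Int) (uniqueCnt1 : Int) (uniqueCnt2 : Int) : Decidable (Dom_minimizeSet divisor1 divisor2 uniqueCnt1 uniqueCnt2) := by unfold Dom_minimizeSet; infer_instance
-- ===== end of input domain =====

-- B replaces A's binary search by a closed-form threshold computation (objective: faster, O(1) vs ~34 probes).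

-- ===== PORT A =====
-- termination helpers for the while-loop's recursion (cited by pvSearch's decreasing_by)
theorem pvMid_ge {l r : Int} (h : l < r) : l ≤ PySem.Int.floordiv (l + r) 2 :=
  (PySem.Int.le_floordiv_iff_mul_le (by omega)).mpr (by omega)

theorem pvMid_lt {l r : Int} (h : l < r) : PySem.Int.floordiv (l + r) 2 < r :=
  (PySem.Int.floordiv_lt_iff_lt_mul (by omega)).mpr (by omega)

-- A's inner helper can_form_sets
def pvCanFormSets (divisor1 divisor2 uniqueCnt1 uniqueCnt2 mid : Int) : Bool :=
  let lcm := PySem.Int.floordiv (divisor1 * divisor2) (Int.gcd divisor1 divisor2)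
  let notDivByDivisor1 := mid - PySem.Int.floordiv mid divisor1
  let notDivByDivisor2 := mid - PySem.Int.floordiv mid divisor2
  let notDivByBoth := mid - PySem.Int.floordiv mid lcm
  (decide (uniqueCnt1 ≤ notDivByDivisor1) && decide (uniqueCnt2 ≤ notDivByDivisor2)) &&
    decide (uniqueCnt1 + uniqueCnt2 ≤ notDivByBoth)

-- A's while-loop over (left, right)
def pvSearch (divisor1 divisor2 uniqueCnt1 uniqueCnt2 left right : Int) : Int :=
  if h : left < right then
    let mid := PySem.Int.floordiv (left + right) 2
    if pvCanFormSets divisor1 divisor2 uniqueCnt1 uniqueCnt2 mid then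
      pvSearch divisor1 divisor2 uniqueCnt1 uniqueCnt2 left mid
    else
      pvSearch divisor1 divisor2 uniqueCnt1 uniqueCnt2 (mid + 1) right
  else left
termination_by (right - left).toNat
decreasing_by
  · have h1 := pvMid_ge h; have h2 := pvMid_lt h; omega
  · have h1 := pvMid_ge h; have h2 := pvMid_lt h; omega

def minimizeSet (divisor1 : Int) (divisor2 : Int) (uniqueCnt1 : Int) (uniqueCnt2 : Int) : Int :=
  pvSearch divisor1 divisor2 uniqueCnt1 uniqueCnt2 1 10000000000

-- ===== PORT B =====
-- B's helper first_reaching: smallest n ≥ 1 with n - n//d ≥ c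
def pvFirstReaching (d c : Int) : Int :=
  if c ≤ 0 then 1
  else
    PySem.Int.floordiv (c - 1) (d - 1) * d + PySem.Int.mod (c - 1) (d - 1) + 1

def minimizeSet_alt (divisor1 : Int) (divisor2 : Int) (uniqueCnt1 : Int) (uniqueCnt2 : Int) : Int :=
  let lcm := PySem.Int.floordiv (divisor1 * divisor2) (Int.gcd divisor1 divisor2)
  max (max (pvFirstReaching divisor1 uniqueCnt1) (pvFirstReaching divisor2 uniqueCnt2))
    (pvFirstReaching lcm (uniqueCnt1 + uniqueCnt2))

-- ===== PRECONDITION & SPEC =====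
-- Pre_ excludes: divisor1 = 0 or divisor2 = 0, where A raises ZeroDivisionError; and the
-- infeasible instances (a divisor or the lcm equal to 1 while its required count is positive),
-- where no threshold exists and A merely returns its arbitrary search bound 10^10 (B raises there).
def Pre_minimizeSet (divisor1 : Int) (divisor2 : Int) (uniqueCnt1 : Int) (uniqueCnt2 : Int) : Prop :=
  divisor1 ≠ 0 ∧ divisor2 ≠ 0 ∧
    (1 ≤ uniqueCnt1 → divisor1 ≠ 1) ∧ (1 ≤ uniqueCnt2 → divisor2 ≠ 1) ∧
    (1 ≤ uniqueCnt1 + uniqueCnt2 →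
      PySem.Int.floordiv (divisor1 * divisor2) (Int.gcd divisor1 divisor2) ≠ 1)
instance (divisor1 : Int) (divisor2 : Int) (uniqueCnt1 : Int) (uniqueCnt2 : Int) : Decidable (Pre_minimizeSet divisor1 divisor2 uniqueCnt1 uniqueCnt2) := by unfold Pre_minimizeSet; infer_instance

def pvWitness_minimizeSet : Int × Int × Int × Int := (3, 7, 1, 2)

def Spec_minimizeSet (divisor1 : Int) (divisor2 : Int) (uniqueCnt1 : Int) (uniqueCnt2 : Int) (out : Int) : Prop := out = minimizeSet_alt divisor1 divisor2 uniqueCnt1 uniqueCnt2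
instance (divisor1 : Int) (divisor2 : Int) (uniqueCnt1 : Int) (uniqueCnt2 : Int) (out : Int) : Decidable (Spec_minimizeSet divisor1 divisor2 uniqueCnt1 uniqueCnt2 out) := by unfold Spec_minimizeSet; infer_instance

-- ===== CLAIM (what is proved, stated in full; the proofs are below) =====
def Claim_equal_minimizeSet : Prop := ∀ (divisor1 : Int) (divisor2 : Int) (uniqueCnt1 : Int) (uniqueCnt2 : Int), Dom_minimizeSet divisor1 divisor2 uniqueCnt1 uniqueCnt2 → Pre_minimizeSet divisor1 divisor2 uniqueCnt1 uniqueCnt2 → Spec_minimizeSet divisor1 divisor2 uniqueCnt1 uniqueCnt2 (minimizeSet divisor1 divisor2 uniqueCnt1 uniqueCnt2)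

-- ===== LEMMAS AND PROOFS =====

-- characterisation of B's closed form: for d ∉ {0,1} (d = 1 allowed when c ≤ 0) and n ≥ 1,
-- the count n - n//d reaches c exactly from n = pvFirstReaching d c on.
theorem pvFirst_iff (d c n : Int) (hd : d ≠ 0) (hd1 : 1 ≤ c → d ≠ 1) (hn : 1 ≤ n) :
    (c ≤ n - PySem.Int.floordiv n d) ↔ pvFirstReaching d c ≤ n := by
  have hqm := PySem.Int.floordiv_mul_add_mod n d
  set q := PySem.Int.floordiv n d with hq
  set m := PySem.Int.mod n d with hm
  unfold pvFirstReaching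
  by_cases hc : c ≤ 0
  · rw [if_pos hc]
    constructor
    · intro _; omega
    · intro _
      rcases lt_or_gt_of_ne hd with hdneg | hdpos
      · have hb := PySem.Int.mod_neg_bounds n hdneg
        rw [← hm] at hb
        have hq0 : q ≤ 0 := by
          by_contra hqpos
          push_neg at hqpos
          nlinarith
        omega
      · have h0 := PySem.Int.mod_nonneg n hdpos
        have h1 := PySem.Int.mod_lt n hdpos
        rw [← hm] at h0 h1
        have hq0 : 0 ≤ q := by
          by_contra hh
          push_neg at hh
          nlinarith
        have hqd : q ≤ q * d := by nlinarith
        omega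
  · rw [if_neg hc]
    have hdne1 : d ≠ 1 := hd1 (by omega)
    have hgr := PySem.Int.floordiv_mul_add_mod (c - 1) (d - 1)
    set g := PySem.Int.floordiv (c - 1) (d - 1) with hgdef
    set r := PySem.Int.mod (c - 1) (d - 1) with hrdef
    by_cases hd2 : 1 < d
    · have hr0 := PySem.Int.mod_nonneg (c - 1) (b := d - 1) (by omega)
      have hr1 := PySem.Int.mod_lt (c - 1) (b := d - 1) (by omega)
      rw [← hrdef] at hr0 hr1
      have hm0 := PySem.Int.mod_nonneg n (b := d) (by omega)
      have hm1 := PySem.Int.mod_lt n (b := d) (by omega)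
      rw [← hm] at hm0 hm1
      have e : n - q = q * (d - 1) + m := by nlinarith [hqm]
      constructor
      · intro hcle
        rcases lt_trichotomy q g with hlt | heq | hgt
        · exfalso
          have h3 : q * (d - 1) ≤ (g - 1) * (d - 1) := by nlinarith
          nlinarith
        · rw [heq] at e
          nlinarith
        · have h3 : (g + 1) * d ≤ q * d := by nlinarith
          nlinarith
      · intro hge
        rcases lt_trichotomy q g with hlt | heq | hgt
        · exfalso
          have h3 : q * d ≤ (g - 1) * d := by nlinarith
          nlinarith
        · rw [heq] at e
          nlinarith
        · have h3 : (g + 1) * (d - 1) ≤ q * (d - 1) := by nlinarith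
          nlinarith
    · have hdneg : d < 0 := by omega
      have hmb := PySem.Int.mod_neg_bounds n hdneg
      rw [← hm] at hmb
      have hrb := PySem.Int.mod_neg_bounds (c - 1) (b := d - 1) (by omega)
      rw [← hrdef] at hrb
      have e : n - q = q * (d - 1) + m := by nlinarith [hqm]
      constructor
      · intro hcle
        rcases lt_trichotomy q g with hlt | heq | hgt
        · -- q < g: n ≥ T unconditionally since q*d ≥ (g-1)*d = g*d - d and m ≥ d + 1
          have h3 : (g - 1) * d ≤ q * d := by nlinarith
          nlinarith
        · rw [heq] at e
          nlinarith
        · -- q > g: from the count hypothesis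
          have h3 : (g + 1) * (d - 1) ≥ q * (d - 1) := by nlinarith
          nlinarith
      · intro hge
        rcases lt_trichotomy q g with hlt | heq | hgt
        · -- q < g: the count condition follows directly
          have h3 : (g - q) * d + r + 1 ≤ m := by nlinarith
          have h4 : (g - q) * (d - 1) = (g - q) * d - (g - q) := by ring
          nlinarith
        · rw [heq] at e
          nlinarith
        · have h3 : (g + 1) * (d - 1) ≥ q * (d - 1) := by nlinarith
          nlinarith

-- bounds on B's threshold: 1 ≤ T, and T ≤ 2c when c ≥ 1
theorem pvFirst_pos (d c : Int) (hd : d ≠ 0) (hd1 : 1 ≤ c → d ≠ 1) :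
    1 ≤ pvFirstReaching d c := by
  unfold pvFirstReaching
  by_cases hc : c ≤ 0
  · rw [if_pos hc]
  · rw [if_neg hc]
    have hdne1 : d ≠ 1 := hd1 (by omega)
    have hgr := PySem.Int.floordiv_mul_add_mod (c - 1) (d - 1)
    set g := PySem.Int.floordiv (c - 1) (d - 1) with hgdef
    set r := PySem.Int.mod (c - 1) (d - 1) with hrdef
    by_cases hd2 : 1 < d
    · have hr0 := PySem.Int.mod_nonneg (c - 1) (b := d - 1) (by omega)
      have hr1 := PySem.Int.mod_lt (c - 1) (b := d - 1) (by omega)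
      rw [← hrdef] at hr0 hr1
      have hg0 : 0 ≤ g := by nlinarith
      nlinarith
    · have hdneg : d < 0 := by omega
      have hrb := PySem.Int.mod_neg_bounds (c - 1) (b := d - 1) (by omega)
      rw [← hrdef] at hrb
      -- g ≥ 1 - c, hence T = c + g ≥ 1
      have hg : 1 - c ≤ g := by
        by_contra hh
        push_neg at hh
        have h1 : (-c) * (d - 1) ≤ g * (d - 1) := by nlinarith
        nlinarith
      nlinarith

theorem pvFirst_le (d c : Int) (hd : d ≠ 0) (hd1 : 1 ≤ c → d ≠ 1) :
    pvFirstReaching d c ≤ max (2 * c) 1 := by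
  unfold pvFirstReaching
  by_cases hc : c ≤ 0
  · rw [if_pos hc]; exact le_max_right _ _
  · rw [if_neg hc]
    have hdne1 : d ≠ 1 := hd1 (by omega)
    have hgr := PySem.Int.floordiv_mul_add_mod (c - 1) (d - 1)
    set g := PySem.Int.floordiv (c - 1) (d - 1) with hgdef
    set r := PySem.Int.mod (c - 1) (d - 1) with hrdef
    have hle : g * d + r + 1 ≤ 2 * c := by
      by_cases hd2 : 1 < d
      · have hr0 := PySem.Int.mod_nonneg (c - 1) (b := d - 1) (by omega)
        have hr1 := PySem.Int.mod_lt (c - 1) (b := d - 1) (by omega)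
        rw [← hrdef] at hr0 hr1
        have hg0 : 0 ≤ g := by nlinarith
        have hg1 : g ≤ c - 1 := by nlinarith
        nlinarith
      · have hdneg : d < 0 := by omega
        have hrb := PySem.Int.mod_neg_bounds (c - 1) (b := d - 1) (by omega)
        rw [← hrdef] at hrb
        have hg0 : g ≤ 0 := by
          by_contra hh
          push_neg at hh
          nlinarith
        nlinarith
    exact le_trans hle (le_max_left _ _)

-- A's binary search returns min right T when the predicate is (T ≤ ·) on the probed interval
theorem pvSearch_eq (d1 d2 c1 c2 T : Int) : ∀ (fuel : Nat) (l r : Int), (r - l).toNat ≤ fuel → l ≤ r → l ≤ T →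
    (∀ n, l ≤ n → n < r → (pvCanFormSets d1 d2 c1 c2 n = true ↔ T ≤ n)) →
    pvSearch d1 d2 c1 c2 l r = min r T := by
  intro fuel
  induction fuel with
  | zero =>
    intro l r hf hlr hT _
    have hlr' : l = r := by omega
    subst hlr'
    rw [pvSearch]
    simp only [lt_irrefl, dite_false]
    omega
  | succ f ih =>
    intro l r hf hlr hT hiff
    rw [pvSearch]
    by_cases h : l < r
    · set mid := PySem.Int.floordiv (l + r) 2 with hm
      have h1 := pvMid_ge h
      have h2 := pvMid_lt h
      rw [← hm] at h1 h2
      simp only [dif_pos h]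
      by_cases hp : pvCanFormSets d1 d2 c1 c2 mid = true
      · rw [if_pos hp]
        have hTm : T ≤ mid := (hiff mid (by omega) (by omega)).mp hp
        have hrec := ih l mid (by omega) (by omega) hT
          (fun n hn hn' => hiff n hn (by omega))
        rw [hrec]; omega
      · rw [if_neg hp]
        have hTm : ¬ T ≤ mid := fun hh => hp ((hiff mid (by omega) (by omega)).mpr hh)
        exact ih (mid + 1) r (by omega) (by omega) (by omega)
          (fun n hn hn' => hiff n (by omega) hn')
    · rw [dif_neg h]
      omega

-- ===== VERDICT (by name: the statement is the Claim_ definition above) =====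
theorem minimizeSet_spec : Claim_equal_minimizeSet := by
  intro d1 d2 c1 c2 hdom hpre
  obtain ⟨hd1, hd2, hf1, hf2, hfL⟩ := hpre
  have hDom : (-2147483648 ≤ d1 ∧ d1 ≤ 2147483648) ∧ (-2147483648 ≤ d2 ∧ d2 ≤ 2147483648) ∧
      (-2147483648 ≤ c1 ∧ c1 ≤ 2147483648) ∧ (-2147483648 ≤ c2 ∧ c2 ≤ 2147483648) := by
    simp only [Dom_minimizeSet, pvDomInt, Bool.and_eq_true, decide_eq_true_eq] at hdom
    tauto
  simp only [Spec_minimizeSet, minimizeSet, minimizeSet_alt]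
  have hgpos : (0 : Int) < (Int.gcd d1 d2 : Int) := by
    have : 0 < Int.gcd d1 d2 := Int.gcd_pos_iff.mpr (Or.inl hd1)
    omega
  set G := ((Int.gcd d1 d2 : Nat) : Int) with hG
  set L := PySem.Int.floordiv (d1 * d2) G with hL
  have hdvd : G ∣ d1 * d2 := dvd_mul_of_dvd_left (Int.gcd_dvd_left d1 d2) d2
  have hLv : L * G = d1 * d2 := by
    rw [hL, PySem.Int.floordiv_eq_ediv_of_pos hgpos]
    exact Int.ediv_mul_cancel hdvd
  have hLne : L ≠ 0 := by
    intro h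
    rw [h, zero_mul] at hLv
    exact mul_ne_zero hd1 hd2 hLv.symm
  set T1 := pvFirstReaching d1 c1 with hT1
  set T2 := pvFirstReaching d2 c2 with hT2
  set T3 := pvFirstReaching L (c1 + c2) with hT3
  set M := max (max T1 T2) T3 with hM
  have hp1 := pvFirst_pos d1 c1 hd1 hf1
  have hp2 := pvFirst_pos d2 c2 hd2 hf2
  have hp3 := pvFirst_pos L (c1 + c2) hLne hfL
  have hl1 := pvFirst_le d1 c1 hd1 hf1
  have hl2 := pvFirst_le d2 c2 hd2 hf2
  have hl3 := pvFirst_le L (c1 + c2) hLne hfL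
  rw [← hT1] at hp1 hl1
  rw [← hT2] at hp2 hl2
  rw [← hT3] at hp3 hl3
  have hM1 : (1 : Int) ≤ M := by
    rw [hM]
    have := le_max_right (max T1 T2) T3
    omega
  have hMle : M ≤ 10000000000 := by
    have b1 : T1 ≤ max (2 * c1) 1 := hl1
    have b2 : T2 ≤ max (2 * c2) 1 := hl2
    have b3 : T3 ≤ max (2 * (c1 + c2)) 1 := hl3
    simp only [hM, max_le_iff]
    have := hDom.2.2.1
    have := hDom.2.2.2
    constructor
    · constructor
      · rcases le_max_iff.mp (le_refl (max (2*c1) 1)) with _ | _ <;> omega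
      · rcases le_max_iff.mp (le_refl (max (2*c2) 1)) with _ | _ <;> omega
    · rcases le_max_iff.mp (le_refl (max (2*(c1+c2)) 1)) with _ | _ <;> omega
  have hsearch := pvSearch_eq d1 d2 c1 c2 M 10000000000 1 10000000000
    (by omega) (by omega) (by omega) ?_
  · rw [hsearch]; omega
  · intro n hn hn'
    have i1 := pvFirst_iff d1 c1 n hd1 hf1 hn
    have i2 := pvFirst_iff d2 c2 n hd2 hf2 hn
    have i3 := pvFirst_iff L (c1 + c2) n hLne hfL hn
    rw [← hT1] at i1
    rw [← hT2] at i2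
    rw [← hT3] at i3
    simp only [pvCanFormSets, ← hG, ← hL, Bool.and_eq_true, decide_eq_true_eq]
    constructor
    · rintro ⟨⟨a1, a2⟩, a3⟩
      have t1 := i1.mp a1
      have t2 := i2.mp a2
      have t3 := i3.mp a3
      simp only [hM]
      omega
    · intro hMn
      have hMn' : T1 ≤ n ∧ T2 ≤ n ∧ T3 ≤ n := by
        simp only [hM] at hMn
        omega
      exact ⟨⟨i1.mpr hMn'.1, i2.mpr hMn'.2.1⟩, i3.mpr hMn'.2.2⟩
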